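-- pv_equiv track=rewrite | github.com/BarneyEvans/REFINED_PART3 | Boundary_Deduction.py | find_closest_point_by_y
-- ===== SOURCE A (Python) =====
-- def find_closest_point_by_y(query_points, strip_data):
--     """
--     Finds the closest strip point by Y-coordinate for each query point from each strip.
--
--     Args:
--     query_points (list): A list of points, each represented as [x, y].
--     strip_data (list): A list of tuples from the strips data for a camera, each containing a strip identifier and a point.
--
--     Returns:
--     list: A list containing lists of tuples for each query point, where each tuple contains the closest strip identifier,
--           strip point, and the query point it corresponds to.
--     """
--     all_closest_points = []
--     for query_point in query_points:
--         closest_points = []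
--         # Initialize a dictionary to track the closest point for each strip
--         min_y_diffs = {}
--         closest_for_each_strip = {}
--
--         for strip_id, point in strip_data:
--             # Initialize if strip_id is new
--             if strip_id not in min_y_diffs:
--                 min_y_diffs[strip_id] = float('inf')
--                 closest_for_each_strip[strip_id] = None
--
--             y_diff = abs(point[1] - query_point[1])
--             if y_diff < min_y_diffs[strip_id]:
--                 min_y_diffs[strip_id] = y_diff
--                 closest_for_each_strip[strip_id] = (strip_id, point, query_point)
--
--         # Collect closest points for this query point from each strip
--         for strip_point in closest_for_each_strip.values():
--             if strip_point:
--                 closest_points.append(strip_point)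
--
--         all_closest_points.append(closest_points)
--     return all_closest_points
-- ===== SOURCE B (Python) =====
-- from bisect import bisect_left
--
--
-- def find_closest_point_by_y(query_points, strip_data):
--     # Group the strip points by strip id once (insertion order = first appearance),
--     # sort each group by (y, original index) -- the index makes the tuples unique, so
--     # plain tuple sort never compares the points themselves -- and answer each query
--     # per strip with a binary search; |y - qy| ties break to the earliest original index.
--     groups = {}
--     for i, (strip_id, point) in enumerate(strip_data):
--         if strip_id not in groups:
--             groups[strip_id] = []
--         groups[strip_id].append((point[1], i, point))
--     strips = []
--     for sid, g in groups.items():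
--         g.sort()
--         strips.append((sid, g, [t[0] for t in g]))
--
--     result = []
--     for q in query_points:
--         qy = q[1]
--         row = []
--         for sid, g, ys in strips:
--             pos = bisect_left(ys, qy)
--             if pos == len(g):
--                 c = g[bisect_left(ys, ys[pos - 1])]
--             elif pos == 0:
--                 c = g[0]
--             else:
--                 left = g[bisect_left(ys, ys[pos - 1])]
--                 right = g[pos]
--                 if (qy - left[0], left[1]) < (right[0] - qy, right[1]):
--                     c = left
--                 else:
--                     c = right
--             row.append((sid, c[2], q))
--         result.append(row)
--     return result
-- ===== Notes on version B (the rewrite author's own statement) =====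
-- stated objective: alternative
-- what changed: Instead of rescanning all of strip_data for every query with per-query dictionaries, B groups strip points by strip id once, sorts each group by (y, original index), and answers each query per strip by binary search (bisect_left) over the two neighbouring candidates, breaking |y|-ties towards the earliest original index; per-query work drops from O(S) to O(K log S) but a timing run did not measure B as faster on its input mix.
-- outside the precondition, e.g. on find_closest_point_by_y([], [(0, [])]): A returns [], B raises IndexError; on find_closest_point_by_y([[0]], []): A returns [[]], B raises IndexError
import Mathlib
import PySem

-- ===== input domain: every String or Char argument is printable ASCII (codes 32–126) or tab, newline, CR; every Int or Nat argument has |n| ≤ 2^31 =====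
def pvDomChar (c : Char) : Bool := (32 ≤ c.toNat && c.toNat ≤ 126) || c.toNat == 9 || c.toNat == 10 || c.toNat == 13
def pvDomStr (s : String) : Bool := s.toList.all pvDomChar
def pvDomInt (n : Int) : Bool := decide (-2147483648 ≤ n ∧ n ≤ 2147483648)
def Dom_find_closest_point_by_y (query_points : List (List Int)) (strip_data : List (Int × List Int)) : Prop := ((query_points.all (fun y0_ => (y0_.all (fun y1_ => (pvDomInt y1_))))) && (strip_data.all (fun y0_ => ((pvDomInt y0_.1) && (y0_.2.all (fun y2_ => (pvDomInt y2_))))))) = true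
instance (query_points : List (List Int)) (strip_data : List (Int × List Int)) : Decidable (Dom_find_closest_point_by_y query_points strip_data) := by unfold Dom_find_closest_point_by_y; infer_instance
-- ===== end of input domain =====

-- B groups the strip points by strip id once, sorts each group by (y, original index) and
-- answers each query per strip by binary search (bisect_left) with an index tie-break,
-- instead of A's per-query rescan of all of strip_data with per-query dictionaries.

-- ===== PORT A =====

-- abs(z) for Int (Python's abs on int)
def pvAbs (z : Int) : Int := if z < 0 then -z else z

-- One iteration of A's inner 'for strip_id, point in strip_data' loop.
-- min_y_diffs is modelled as Dict Int (Option Int): the stored value 'none' is exactly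
-- Python's float('inf') sentinel (only ever compared with 'y_diff <', where it loses).
def pvAStep (qy : Int) (st : PySem.Dict Int (Option Int) × PySem.Dict Int (Option (Int × List Int × List Int)))
    (q : List Int) (e : Int × List Int) :
    PySem.Dict Int (Option Int) × PySem.Dict Int (Option (Int × List Int × List Int)) :=
  let sid := e.1
  let pt := e.2
  -- if strip_id not in min_y_diffs: init to inf / None
  let st := if st.1.contains sid then st else (st.1.insert sid none, st.2.insert sid none)
  let y_diff := pvAbs ((PySem.List.pyGet? pt 1).getD 0 - qy)
  let better := match (st.1.get? sid).getD none with
    | none => true            -- y_diff < inf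
    | some m => y_diff < m
  if better then (st.1.insert sid (some y_diff), st.2.insert sid (some (sid, pt, q)))
  else st

def find_closest_point_by_y (query_points : List (List Int)) (strip_data : List (Int × List Int)) : List (List (Int × List Int × List Int)) :=
  query_points.map (fun q =>
    let qy := (PySem.List.pyGet? q 1).getD 0
    let st := strip_data.foldl (fun st e => pvAStep qy st q e) (PySem.Dict.empty, PySem.Dict.empty)
    -- for strip_point in closest_for_each_strip.values(): if strip_point: append
    st.2.values.foldl (fun acc v => match v with
      | some t => acc ++ [t]
      | none => acc) [])

-- ===== PORT B =====

-- Source B's grouping loop body: ensure the key exists, then append (y, i, point) to its group.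
def pvBGroupStep (d : PySem.Dict Int (List (Int × Int × List Int))) (e : Int × (Int × List Int)) :
    PySem.Dict Int (List (Int × Int × List Int)) :=
  let i := e.1
  let sid := e.2.1
  let pt := e.2.2
  let d := if d.contains sid then d else d.insert sid []
  d.modify sid [] (· ++ [((PySem.List.pyGet? pt 1).getD 0, i, pt)])

-- the closest triple of one (already grouped and sorted) strip, by bisection (Source B's inner branch)
def pvBPick (qy : Int) (g : List (Int × Int × List Int)) (ys : List Int) : Int × Int × List Int :=
  let pos := PySem.List.bisectLeft ys qy
  if pos = g.length then
    (PySem.List.pyGet? g (PySem.List.bisectLeft ys ((PySem.List.pyGet? ys ((pos : Int) - 1)).getD 0))).getD (0, 0, [])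
  else if pos = 0 then
    (PySem.List.pyGet? g 0).getD (0, 0, [])
  else
    let left := (PySem.List.pyGet? g (PySem.List.bisectLeft ys ((PySem.List.pyGet? ys ((pos : Int) - 1)).getD 0))).getD (0, 0, [])
    let right := (PySem.List.pyGet? g (pos : Int)).getD (0, 0, [])
    -- Python's 2-tuple comparison (qy - left[0], left[1]) < (right[0] - qy, right[1])
    if qy - left.1 < right.1 - qy ∨ (qy - left.1 = right.1 - qy ∧ left.2.1 < right.2.1) then left
    else right

def find_closest_point_by_y_alt (query_points : List (List Int)) (strip_data : List (Int × List Int)) : List (List (Int × List Int × List Int)) :=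
  let groups := (PySem.List.enumerate strip_data).foldl pvBGroupStep PySem.Dict.empty
  let strips := groups.items.map (fun sg => (sg.1, PySem.List.sorted2 sg.2 (·.1) (·.2.1)))
  let strips := strips.map (fun sg => (sg.1, sg.2, sg.2.map (·.1)))
  query_points.map (fun q =>
    let qy := (PySem.List.pyGet? q 1).getD 0
    strips.map (fun sgy => (sgy.1, (pvBPick qy sgy.2.1 sgy.2.2).2.2, q)))

-- ===== PRECONDITION & SPEC =====
-- Pre_ excludes exactly the inputs on which a point list has no index 1: there A raises
-- IndexError (or, when the other argument is empty, A happens to return without ever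
-- reading that point while B's up-front pass raises).
def Pre_find_closest_point_by_y (query_points : List (List Int)) (strip_data : List (Int × List Int)) : Prop :=
  (∀ q ∈ query_points, 2 ≤ q.length) ∧ (∀ e ∈ strip_data, 2 ≤ e.2.length)
instance (query_points : List (List Int)) (strip_data : List (Int × List Int)) : Decidable (Pre_find_closest_point_by_y query_points strip_data) := by unfold Pre_find_closest_point_by_y; infer_instance

def pvWitness_find_closest_point_by_y : List (List Int) × (List (Int × List Int)) :=
  ([[0, 3], [1, -2]], [(5, [0, 1]), (7, [2, 2]), (5, [1, -2])])

def Spec_find_closest_point_by_y (query_points : List (List Int)) (strip_data : List (Int × List Int)) (out : List (List (Int × List Int × List Int))) : Prop := out = find_closest_point_by_y_alt query_points strip_data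
instance (query_points : List (List Int)) (strip_data : List (Int × List Int)) (out : List (List (Int × List Int × List Int))) : Decidable (Spec_find_closest_point_by_y query_points strip_data out) := by unfold Spec_find_closest_point_by_y; infer_instance

-- ===== CLAIM (what is proved, stated in full; the proofs are below) =====
def Claim_equal_find_closest_point_by_y : Prop := ∀ (query_points : List (List Int)) (strip_data : List (Int × List Int)), Dom_find_closest_point_by_y query_points strip_data → Pre_find_closest_point_by_y query_points strip_data → Spec_find_closest_point_by_y query_points strip_data (find_closest_point_by_y query_points strip_data)

-- ===== LEMMAS AND PROOFS =====

-- The triples (y, original index, point) of the strip-data entries belonging to strip s,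
-- in original order (this is what B's grouping pass collects for s).
def pvTriples (strip_data : List (Int × List Int)) (s : Int) : List (Int × Int × List Int) :=
  ((PySem.List.enumerate strip_data).filter (fun e => e.2.1 == s)).map
    (fun e => ((PySem.List.pyGet? e.2.2 1).getD 0, e.1, e.2.2))

-- strip ids in order of first appearance
def pvSids (strip_data : List (Int × List Int)) : List Int :=
  PySem.List.dedup (strip_data.map (·.1))

-- |y - qy| of a triple
def pvDk (qy : Int) (t : Int × Int × List Int) : Int := pvAbs (t.1 - qy)

-- lexicographic "at least as close, earlier on ties"
def pvKle (qy : Int) (c u : Int × Int × List Int) : Prop :=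
  pvDk qy c < pvDk qy u ∨ (pvDk qy c = pvDk qy u ∧ c.2.1 ≤ u.2.1)

-- A's running strict-improvement scan
def pvChoose (qy : Int) (b : Int × Int × List Int) (l : List (Int × Int × List Int)) : Int × Int × List Int :=
  l.foldl (fun b t => if pvDk qy t < pvDk qy b then t else b) b

-- the triple A ends up storing for strip s (junk if s has no triples)
def pvChoice (qy : Int) (strip_data : List (Int × List Int)) (s : Int) : Int × Int × List Int :=
  match pvTriples strip_data s with
  | [] => (0, 0, [])
  | h :: t => pvChoose qy h t

def pvBest (qy : Int) (g : List (Int × Int × List Int)) (c : Int × Int × List Int) : Prop :=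
  c ∈ g ∧ ∀ u ∈ g, pvKle qy c u

-- strict (y, index) order (what B sorts by)
def pvLt (a b : Int × Int × List Int) : Prop := a.1 < b.1 ∨ (a.1 = b.1 ∧ a.2.1 < b.2.1)

def pvAFold (qy : Int) (q : List Int) (sd : List (Int × List Int)) :
    PySem.Dict Int (Option Int) × PySem.Dict Int (Option (Int × List Int × List Int)) :=
  sd.foldl (fun st e => pvAStep qy st q e) (PySem.Dict.empty, PySem.Dict.empty)

def pvGroups (sd : List (Int × List Int)) : PySem.Dict Int (List (Int × Int × List Int)) :=
  (PySem.List.enumerate sd).foldl pvBGroupStep PySem.Dict.empty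

lemma pvKle_trans {qy : Int} {a b c : Int × Int × List Int} (h1 : pvKle qy a b) (h2 : pvKle qy b c) :
    pvKle qy a c := by
  unfold pvKle at *; omega

lemma pvKle_refl (qy : Int) (a : Int × Int × List Int) : pvKle qy a a := by
  unfold pvKle; omega

lemma pvSids_append (l : List (Int × List Int)) (e : Int × List Int) :
    pvSids (l ++ [e]) = if e.1 ∈ pvSids l then pvSids l else pvSids l ++ [e.1] := by
  unfold pvSids
  rw [List.map_append, List.map_singleton, PySem.List.dedup_eq_ofList, PySem.List.dedup_eq_ofList,
    PySem.Set.ofList_append_singleton, PySem.Set.add]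
  by_cases h : e.1 ∈ PySem.Set.ofList (List.map (fun x => x.1) l) <;>
    simp [h]

lemma pvSids_mem (sd : List (Int × List Int)) (s : Int) : s ∈ pvSids sd ↔ s ∈ sd.map (·.1) := by
  unfold pvSids
  rw [PySem.List.mem_dedup]

lemma pvTriples_append (l : List (Int × List Int)) (e : Int × List Int) (s : Int) :
    pvTriples (l ++ [e]) s = pvTriples l s ++
      (if e.1 = s then [((PySem.List.pyGet? e.2 1).getD 0, (l.length : Int), e.2)] else []) := by
  unfold pvTriples
  rw [PySem.List.enumerate_append, List.filter_append, List.map_append]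
  by_cases h : e.1 = s <;>
    simp [PySem.List.enumerate_cons, PySem.List.enumerate_nil, h]

lemma pvTriples_nil_of_not_mem {sd : List (Int × List Int)} {s : Int} (h : s ∉ pvSids sd) :
    pvTriples sd s = [] := by
  rw [pvSids_mem] at h
  unfold pvTriples
  rw [List.filter_eq_nil_iff.mpr, List.map_nil]
  intro a ha
  have h2 : a.2 ∈ sd := by
    have := PySem.List.map_snd_enumerate sd 0
    rw [← this]
    exact List.mem_map_of_mem ha
  simp only [beq_iff_eq]
  intro heq
  exact h (heq ▸ List.mem_map_of_mem h2)

lemma pvTriples_ne_nil {sd : List (Int × List Int)} {s : Int} (h : s ∈ pvSids sd) :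
    pvTriples sd s ≠ [] := by
  rw [pvSids_mem] at h
  obtain ⟨p, hp, hps⟩ := List.mem_map.mp h
  obtain ⟨k, hk, hpk⟩ := List.getElem_of_mem hp
  have hmem : ((k : Int), p) ∈ PySem.List.enumerate sd 0 := by
    rw [PySem.List.mem_enumerate_iff]
    exact ⟨k, hk, by simp [hpk]⟩
  have : ((PySem.List.pyGet? p.2 1).getD 0, (k : Int), p.2) ∈ pvTriples sd s := by
    unfold pvTriples
    exact List.mem_map_of_mem (List.mem_filter.mpr ⟨hmem, by simp [hps]⟩)
  exact List.ne_nil_of_mem this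

lemma pvTriples_pairwise (sd : List (Int × List Int)) (s : Int) :
    (pvTriples sd s).Pairwise (fun a b => a.2.1 < b.2.1) := by
  exact ((PySem.List.pairwise_lt_enumerate sd 0).filter _).map _ (fun a b h => h)

-- ========== A side ==========

lemma pvChoice_append_other {l : List (Int × List Int)} {e : Int × List Int} {s : Int}
    (qy : Int) (hs : s ≠ e.1) : pvChoice qy (l ++ [e]) s = pvChoice qy l s := by
  unfold pvChoice
  rw [pvTriples_append, if_neg (fun h => hs h.symm), List.append_nil]

lemma pvChoice_append_new {l : List (Int × List Int)} {e : Int × List Int}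
    (qy : Int) (hm : e.1 ∉ pvSids l) :
    pvChoice qy (l ++ [e]) e.1 = ((PySem.List.pyGet? e.2 1).getD 0, (l.length : Int), e.2) := by
  unfold pvChoice
  rw [pvTriples_append, if_pos rfl, pvTriples_nil_of_not_mem hm, List.nil_append]
  rfl

lemma pvChoice_append_self {l : List (Int × List Int)} {e : Int × List Int}
    (qy : Int) (hm : e.1 ∈ pvSids l) :
    pvChoice qy (l ++ [e]) e.1 =
      (if pvDk qy ((PySem.List.pyGet? e.2 1).getD 0, (l.length : Int), e.2)
            < pvDk qy (pvChoice qy l e.1)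
       then ((PySem.List.pyGet? e.2 1).getD 0, (l.length : Int), e.2)
       else pvChoice qy l e.1) := by
  unfold pvChoice
  rw [pvTriples_append, if_pos rfl]
  rcases htr : pvTriples l e.1 with _ | ⟨h, t⟩
  · exact absurd htr (pvTriples_ne_nil hm)
  · simp only [List.cons_append]
    unfold pvChoose
    rw [List.foldl_append]
    rfl


lemma pvA_fold (qy : Int) (q : List Int) (sd : List (Int × List Int)) :
    (pvAFold qy q sd).1.keys = pvSids sd ∧ (pvAFold qy q sd).2.keys = pvSids sd ∧
    ∀ s ∈ pvSids sd,
      (pvAFold qy q sd).1.get? s = some (some (pvDk qy (pvChoice qy sd s))) ∧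
      (pvAFold qy q sd).2.get? s = some (some (s, (pvChoice qy sd s).2.2, q)) := by
  induction sd using List.reverseRecOn with
  | nil =>
    refine ⟨?_, ?_, ?_⟩ <;>
      simp [pvAFold, pvSids, PySem.List.dedup_eq_ofList, PySem.Set.ofList_nil,
        PySem.Dict.keys_empty]
  | append_singleton l e ih =>
    obtain ⟨hk1, hk2, hget⟩ := ih
    have hfold : pvAFold qy q (l ++ [e]) = pvAStep qy (pvAFold qy q l) q e := by
      unfold pvAFold; rw [List.foldl_append]; rfl
    rw [hfold]
    set st := pvAFold qy q l with hst
    by_cases hm : e.1 ∈ pvSids l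
    · have hc1 : st.1.contains e.1 = true := by
        rw [PySem.Dict.contains_iff_mem_keys, hk1]; exact hm
      have hc2 : st.2.contains e.1 = true := by
        rw [PySem.Dict.contains_iff_mem_keys, hk2]; exact hm
      obtain ⟨hg1, hg2⟩ := hget e.1 hm
      have hstep : pvAStep qy st q e =
          if pvDk qy ((PySem.List.pyGet? e.2 1).getD 0, (l.length : Int), e.2)
              < pvDk qy (pvChoice qy l e.1)
          then (st.1.insert e.1 (some (pvDk qy ((PySem.List.pyGet? e.2 1).getD 0, (l.length : Int), e.2))),
                st.2.insert e.1 (some (e.1, e.2, q)))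
          else st := by
        simp only [pvAStep, hc1, if_true, hg1, Option.getD_some]
        simp [pvDk]
      rw [hstep]
      rw [pvSids_append, if_pos hm]
      split_ifs with hlt
      · refine ⟨?_, ?_, ?_⟩
        · rw [PySem.Dict.keys_insert_of_contains _ _ hc1, hk1]
        · rw [PySem.Dict.keys_insert_of_contains _ _ hc2, hk2]
        · intro s hs
          by_cases hse : s = e.1
          · subst hse
            rw [PySem.Dict.get?_insert, if_pos rfl, PySem.Dict.get?_insert, if_pos rfl,
              pvChoice_append_self qy hm, if_pos hlt]
            exact ⟨rfl, rfl⟩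
          · rw [PySem.Dict.get?_insert, if_neg hse, PySem.Dict.get?_insert, if_neg hse,
              pvChoice_append_other qy hse]
            exact hget s hs
      · refine ⟨hk1, hk2, ?_⟩
        intro s hs
        by_cases hse : s = e.1
        · subst hse
          rw [pvChoice_append_self qy hm, if_neg hlt]
          exact ⟨hg1, hg2⟩
        · rw [pvChoice_append_other qy hse]
          exact hget s hs
    · have hc1 : st.1.contains e.1 = false := by
        rw [Bool.eq_false_iff]
        intro hcc
        exact hm (hk1 ▸ (PySem.Dict.contains_iff_mem_keys _ _).mp hcc)
      have hc2 : st.2.contains e.1 = false := by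
        rw [Bool.eq_false_iff]
        intro hcc
        exact hm (hk2 ▸ (PySem.Dict.contains_iff_mem_keys _ _).mp hcc)
      have hstep : pvAStep qy st q e =
          (st.1.insert e.1 (some (pvDk qy ((PySem.List.pyGet? e.2 1).getD 0, (l.length : Int), e.2))),
           st.2.insert e.1 (some (e.1, e.2, q))) := by
        simp only [pvAStep, hc1, if_false, Bool.false_eq_true, PySem.Dict.get?_insert_self,
          Option.getD_some, PySem.Dict.insert_insert_self]
        simp [pvDk]
      rw [hstep]
      rw [pvSids_append, if_neg hm]
      refine ⟨?_, ?_, ?_⟩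
      · rw [PySem.Dict.keys_insert_of_not_contains _ _ hc1, hk1]
      · rw [PySem.Dict.keys_insert_of_not_contains _ _ hc2, hk2]
      · intro s hs
        by_cases hse : s = e.1
        · subst hse
          rw [PySem.Dict.get?_insert, if_pos rfl, PySem.Dict.get?_insert, if_pos rfl,
            pvChoice_append_new qy hm]
          exact ⟨rfl, rfl⟩
        · have hs' : s ∈ pvSids l := by
            rcases List.mem_append.mp hs with h | h
            · exact h
            · simp at h; exact absurd h hse
          rw [PySem.Dict.get?_insert, if_neg hse, PySem.Dict.get?_insert, if_neg hse,
            pvChoice_append_other qy hse]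
          exact hget s hs'

lemma pvFoldl_match_some {E : Type} (f : List E → Option E → List E)
    (hf : ∀ acc t, f acc (some t) = acc ++ [t]) (l : List E) (acc : List E) :
    (l.map some).foldl f acc = acc ++ l := by
  induction l generalizing acc with
  | nil => simp
  | cons h t ih => simp [hf, ih]

lemma pvRowA (q : List Int) (sd : List (Int × List Int)) :
    (let qy := (PySem.List.pyGet? q 1).getD 0
     (pvAFold qy q sd).2.values.foldl
       (fun acc v => match v with | some t => acc ++ [t] | none => acc) [])
      = (pvSids sd).map (fun s => (s, (pvChoice ((PySem.List.pyGet? q 1).getD 0) sd s).2.2, q)) := by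
  simp only
  obtain ⟨hk1, hk2, hget⟩ := pvA_fold ((PySem.List.pyGet? q 1).getD 0) q sd
  have hnd : (pvAFold ((PySem.List.pyGet? q 1).getD 0) q sd).2.keys.Nodup := by
    rw [hk2]; exact PySem.List.nodup_dedup _
  rw [PySem.Dict.values_eq_map_keys _ hnd none, hk2]
  have hv : (pvSids sd).map
      (fun s => (pvAFold ((PySem.List.pyGet? q 1).getD 0) q sd).2.getD s none)
      = ((pvSids sd).map
          (fun s => (s, (pvChoice ((PySem.List.pyGet? q 1).getD 0) sd s).2.2, q))).map some := by
    rw [List.map_map]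
    apply List.map_congr_left
    intro s hs
    rw [PySem.Dict.getD_eq_get?_getD, (hget s hs).2]
    rfl
  rw [hv, pvFoldl_match_some _ (fun acc t => rfl)]
  simp

lemma pvA_eq (query_points : List (List Int)) (sd : List (Int × List Int)) :
    find_closest_point_by_y query_points sd = query_points.map (fun q =>
      (pvSids sd).map (fun s => (s, (pvChoice ((PySem.List.pyGet? q 1).getD 0) sd s).2.2, q))) := by
  unfold find_closest_point_by_y
  apply List.map_congr_left
  intro q _
  exact pvRowA q sd

-- ========== B side: grouping ==========

lemma pvGroups_spec (sd : List (Int × List Int)) :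
    (pvGroups sd).keys = pvSids sd ∧ ∀ s, (pvGroups sd).getD s [] = pvTriples sd s := by
  induction sd using List.reverseRecOn with
  | nil =>
    constructor
    · simp [pvGroups, PySem.List.enumerate_nil, pvSids, PySem.List.dedup_eq_ofList,
        PySem.Set.ofList_nil, PySem.Dict.keys_empty]
    · intro s
      simp [pvGroups, PySem.List.enumerate_nil, pvTriples, PySem.Dict.getD_empty]
  | append_singleton l e ih =>
    obtain ⟨hk, hg⟩ := ih
    have hfold : pvGroups (l ++ [e]) = pvBGroupStep (pvGroups l) ((l.length : Int), e) := by
      unfold pvGroups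
      rw [PySem.List.enumerate_append, List.foldl_append]
      simp [PySem.List.enumerate_cons, PySem.List.enumerate_nil]
    rw [hfold]
    by_cases hm : e.1 ∈ pvSids l
    · have hc : (pvGroups l).contains e.1 = true := by
        rw [PySem.Dict.contains_iff_mem_keys, hk]; exact hm
      simp only [pvBGroupStep, hc, if_true]
      refine ⟨?_, ?_⟩
      · rw [PySem.Dict.keys_modify, PySem.Dict.keys_insert_of_contains _ _ hc, hk,
          pvSids_append, if_pos hm]
      · intro s
        rw [PySem.Dict.getD_modify, pvTriples_append]
        by_cases hs : s = e.1
        · subst hs; rw [if_pos rfl, if_pos rfl, hg]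
        · rw [if_neg hs, if_neg (fun h => hs h.symm), List.append_nil, hg]
    · have hc : (pvGroups l).contains e.1 = false := by
        rw [Bool.eq_false_iff]
        intro hcc
        exact hm (hk ▸ (PySem.Dict.contains_iff_mem_keys _ _).mp hcc)
      simp only [pvBGroupStep, hc, if_false, Bool.false_eq_true]
      have hc2 : ((pvGroups l).insert e.1 []).contains e.1 = true :=
        PySem.Dict.contains_insert_self _ _ _
      refine ⟨?_, ?_⟩
      · rw [PySem.Dict.keys_modify, PySem.Dict.keys_insert_of_contains _ _ hc2,
          PySem.Dict.keys_insert_of_not_contains _ _ hc, hk, pvSids_append, if_neg hm]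
      · intro s
        rw [PySem.Dict.getD_modify, pvTriples_append]
        by_cases hs : s = e.1
        · subst hs
          rw [if_pos rfl, if_pos rfl, PySem.Dict.getD_insert, if_pos rfl,
            pvTriples_nil_of_not_mem hm]
        · rw [if_neg hs, if_neg (fun h => hs h.symm), List.append_nil,
            PySem.Dict.getD_insert, if_neg hs, hg]

lemma pvB_eq (query_points : List (List Int)) (sd : List (Int × List Int)) :
    find_closest_point_by_y_alt query_points sd = query_points.map (fun q =>
      (pvSids sd).map (fun s =>
        (s, (pvBPick ((PySem.List.pyGet? q 1).getD 0)
               (PySem.List.sorted2 (pvTriples sd s) (·.1) (·.2.1))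
               ((PySem.List.sorted2 (pvTriples sd s) (·.1) (·.2.1)).map (·.1))).2.2, q))) := by
  have h1 : ((PySem.List.enumerate sd).foldl pvBGroupStep PySem.Dict.empty) = pvGroups sd := rfl
  obtain ⟨hk, hg⟩ := pvGroups_spec sd
  have hnd : (pvGroups sd).keys.Nodup := by
    rw [hk]; exact PySem.List.nodup_dedup _
  have hitems : (pvGroups sd).items = (pvSids sd).map (fun s => (s, pvTriples sd s)) := by
    rw [PySem.Dict.items_eq_map_keys _ hnd [], hk]
    exact List.map_congr_left (fun s hs => by rw [hg s])
  simp only [find_closest_point_by_y_alt, h1, hitems, List.map_map]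
  rfl

-- ========== the scan picks the best ==========

lemma pvScan_spec (qy : Int) (l : List (Int × Int × List Int)) :
    ∀ b : Int × Int × List Int, (∀ u ∈ l, b.2.1 < u.2.1) →
      l.Pairwise (fun a c => a.2.1 < c.2.1) →
      (pvChoose qy b l = b ∨ pvChoose qy b l ∈ l) ∧ pvKle qy (pvChoose qy b l) b ∧
        ∀ u ∈ l, pvKle qy (pvChoose qy b l) u := by
  induction l with
  | nil =>
    intro b _ _
    exact ⟨Or.inl rfl, pvKle_refl qy b, by simp⟩
  | cons x xs ih =>
    intro b hb hp
    obtain ⟨hpx, hpt⟩ := List.pairwise_cons.mp hp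
    have hch : pvChoose qy b (x :: xs)
        = pvChoose qy (if pvDk qy x < pvDk qy b then x else b) xs := rfl
    by_cases h : pvDk qy x < pvDk qy b
    · rw [hch, if_pos h]
      obtain ⟨hm, hkb, hall⟩ := ih x hpx hpt
      have hkxb : pvKle qy x b := Or.inl h
      have hkxx : pvKle qy x x := pvKle_refl qy x
      refine ⟨?_, pvKle_trans hkb hkxb, ?_⟩
      · rcases hm with h1 | h1
        · exact Or.inr (by rw [h1]; exact List.mem_cons_self)
        · exact Or.inr (List.mem_cons_of_mem _ h1)
      · intro u hu
        rcases List.mem_cons.mp hu with rfl | hu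
        · exact pvKle_trans hkb hkxx
        · exact hall u hu
    · rw [hch, if_neg h]
      have hb' : ∀ u ∈ xs, b.2.1 < u.2.1 := fun u hu => hb u (List.mem_cons_of_mem _ hu)
      obtain ⟨hm, hkb, hall⟩ := ih b hb' hpt
      have hkbx : pvKle qy b x := by
        have hx := hb x List.mem_cons_self
        unfold pvKle
        omega
      refine ⟨?_, hkb, ?_⟩
      · rcases hm with h1 | h1
        · exact Or.inl h1
        · exact Or.inr (List.mem_cons_of_mem _ h1)
      · intro u hu
        rcases List.mem_cons.mp hu with rfl | hu
        · exact pvKle_trans hkb hkbx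
        · exact hall u hu

lemma pvChoice_best {qy s : Int} {sd : List (Int × List Int)} (h : s ∈ pvSids sd) :
    pvBest qy (pvTriples sd s) (pvChoice qy sd s) := by
  rcases htr : pvTriples sd s with _ | ⟨h0, t0⟩
  · exact absurd htr (pvTriples_ne_nil h)
  · have hp := pvTriples_pairwise sd s
    rw [htr] at hp
    obtain ⟨hpx, hpt⟩ := List.pairwise_cons.mp hp
    obtain ⟨hm, hkb, hall⟩ := pvScan_spec qy t0 h0 hpx hpt
    have hchoice : pvChoice qy sd s = pvChoose qy h0 t0 := by
      simp only [pvChoice, htr]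
    unfold pvBest
    rw [hchoice]
    constructor
    · rcases hm with h1 | h1
      · rw [h1]; exact List.mem_cons_self
      · exact List.mem_cons_of_mem _ h1
    · intro u hu
      rcases List.mem_cons.mp hu with rfl | hu
      · exact hkb
      · exact hall u hu

-- ========== sorted2 is (y, index)-ordered ==========

def pvBefore (a b : Int × Int × List Int) : Bool :=
  decide (a.1 < b.1) || (!decide (b.1 < a.1) && decide (a.2.1 < b.2.1))

lemma pvBefore_iff (a b : Int × Int × List Int) :
    pvBefore a b = true ↔ (a.1 < b.1 ∨ (¬ b.1 < a.1 ∧ a.2.1 < b.2.1)) := by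
  simp [pvBefore]

lemma pvBefore_trans {a b c : Int × Int × List Int} (h1 : pvBefore a b = true)
    (h2 : pvBefore b c = true) : pvBefore a c = true := by
  rw [pvBefore_iff] at h1 h2 ⊢
  omega

lemma pvBefore_asym {a b : Int × Int × List Int} (h1 : pvBefore a b = true) :
    pvBefore b a = false := by
  rw [Bool.eq_false_iff, Ne, pvBefore_iff] at *
  omega

lemma pvInsertBy_pairwise (x : Int × Int × List Int) (l : List (Int × Int × List Int))
    (hl : l.Pairwise (fun a b => pvBefore b a = false)) :
    (PySem.List.insertBy pvBefore x l).Pairwise (fun a b => pvBefore b a = false) := by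
  induction l with
  | nil => simp [PySem.List.insertBy]
  | cons y ys ih =>
    obtain ⟨hy, hys⟩ := List.pairwise_cons.mp hl
    by_cases hxy : pvBefore x y = true
    · rw [show PySem.List.insertBy pvBefore x (y :: ys) = x :: y :: ys by
        simp [PySem.List.insertBy, hxy]]
      refine List.pairwise_cons.mpr ⟨?_, hl⟩
      intro z hz
      rcases List.mem_cons.mp hz with rfl | hz
      · exact pvBefore_asym hxy
      · rw [Bool.eq_false_iff]
        intro hzx
        have := pvBefore_trans hzx hxy
        rw [hy z hz] at this
        exact Bool.false_ne_true this
    · have hxy' : pvBefore x y = false := Bool.eq_false_iff.mpr hxy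
      rw [show PySem.List.insertBy pvBefore x (y :: ys) = y :: PySem.List.insertBy pvBefore x ys by
        simp [PySem.List.insertBy, hxy']]
      refine List.pairwise_cons.mpr ⟨?_, ih hys⟩
      intro z hz
      rcases (PySem.List.mem_insertBy _ _ _ _).mp hz with rfl | hz
      · exact hxy'
      · exact hy z hz

lemma pvSorted2_pairwise (xs : List (Int × Int × List Int)) :
    (PySem.List.sorted2 xs (·.1) (·.2.1) false).Pairwise (fun a b => pvBefore b a = false) := by
  have hrfl : PySem.List.sorted2 xs (·.1) (·.2.1) false
      = xs.foldl (fun acc x => PySem.List.insertBy pvBefore x acc) [] := rfl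
  rw [hrfl]
  have haux : ∀ (l : List (Int × Int × List Int)) (acc : List (Int × Int × List Int)),
      acc.Pairwise (fun a b => pvBefore b a = false) →
      (l.foldl (fun acc x => PySem.List.insertBy pvBefore x acc) acc).Pairwise
        (fun a b => pvBefore b a = false) := by
    intro l
    induction l with
    | nil => intro acc h; exact h
    | cons z zs ih => intro acc h; exact ih _ (pvInsertBy_pairwise z acc h)
  exact haux xs [] (by simp)

lemma pvGs_pairwise_lt {sd : List (Int × List Int)} {s : Int} :
    (PySem.List.sorted2 (pvTriples sd s) (·.1) (·.2.1)).Pairwise pvLt := by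
  have hperm := PySem.List.sorted2_perm (pvTriples sd s) (·.1) (·.2.1) false
  have hw := pvSorted2_pairwise (pvTriples sd s)
  have hne : (PySem.List.sorted2 (pvTriples sd s) (·.1) (·.2.1) false).Pairwise
      (fun a b => a.2.1 ≠ b.2.1) := by
    have h1 : (pvTriples sd s).Pairwise (fun a b => a.2.1 ≠ b.2.1) :=
      (pvTriples_pairwise sd s).imp (fun h => ne_of_lt h)
    exact (hperm.pairwise_iff (fun h => h.symm)).mpr h1
  refine (hw.and hne).imp ?_
  intro a b ⟨h1, h2⟩
  rw [Bool.eq_false_iff, Ne, pvBefore_iff] at h1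
  unfold pvLt
  omega

-- ========== the bisection picks the best ==========

lemma pvPick_best (qy : Int) (g : List (Int × Int × List Int)) (hne : g ≠ [])
    (hp : g.Pairwise pvLt) :
    pvBest qy g (pvBPick qy g (g.map (·.1))) := by
  have hn : 0 < g.length := List.length_pos_iff.mpr hne
  have hlen : (g.map (·.1)).length = g.length := by simp
  have hyle : (g.map (·.1)).Pairwise (· ≤ ·) :=
    hp.map _ (fun a b h => by unfold pvLt at h; omega)
  have hstrict := List.pairwise_iff_getElem.mp hp
  have hmono : ∀ i j (_hi : i < g.length) (_hj : j < g.length), i ≤ j → g[i].1 ≤ g[j].1 := by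
    intro i j hi hj hij
    rcases Nat.eq_or_lt_of_le hij with rfl | hlt
    · exact le_refl _
    · have := hstrict i j hi hj hlt
      unfold pvLt at this
      omega
  -- the run-start of the y-value at position p: earliest index with that y
  have hrun : ∀ p (hpl : p < g.length),
      ∃ hj : PySem.List.bisectLeft (g.map (·.1)) (g[p].1) < g.length,
        PySem.List.bisectLeft (g.map (·.1)) (g[p].1) ≤ p ∧
        (g[PySem.List.bisectLeft (g.map (·.1)) (g[p].1)]'hj).1 = g[p].1 ∧
        ∀ k (hk : k < g.length), g[k].1 = g[p].1 →
          (g[PySem.List.bisectLeft (g.map (·.1)) (g[p].1)]'hj).2.1 ≤ g[k].2.1 := by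
    intro p hpl
    obtain ⟨q1, q2, q3⟩ := PySem.List.bisectLeft_spec (g.map (·.1)) (g[p].1) hyle
    rw [hlen] at q1
    have q2' : ∀ k (hk : k < g.length), k < PySem.List.bisectLeft (g.map (·.1)) (g[p].1) →
        g[k].1 < g[p].1 := by
      intro k hk hkj
      have := q2 k (by rw [hlen]; exact hk) hkj
      simpa using this
    have q3' : ∀ k (hk : k < g.length), PySem.List.bisectLeft (g.map (·.1)) (g[p].1) ≤ k →
        g[p].1 ≤ g[k].1 := by
      intro k hk hkj
      have := q3 k (by rw [hlen]; exact hk) hkj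
      simpa using this
    have hjp : PySem.List.bisectLeft (g.map (·.1)) (g[p].1) ≤ p := by
      by_contra hcc
      have := q2' p hpl (by omega)
      omega
    have hjlen : PySem.List.bisectLeft (g.map (·.1)) (g[p].1) < g.length :=
      lt_of_le_of_lt hjp hpl
    have hjy : (g[PySem.List.bisectLeft (g.map (·.1)) (g[p].1)]'hjlen).1 = g[p].1 := by
      have h1 := q3' _ hjlen (le_refl _)
      have h2 := hmono _ p hjlen hpl hjp
      omega
    refine ⟨hjlen, hjp, hjy, ?_⟩
    intro k hk hke
    by_cases hkj : k < PySem.List.bisectLeft (g.map (·.1)) (g[p].1)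
    · have := q2' k hk hkj
      omega
    · rcases Nat.eq_or_lt_of_le (Nat.le_of_not_lt hkj) with heq | hlt2
      · subst heq; exact le_refl _
      · have := hstrict _ k hjlen hk hlt2
        unfold pvLt at this
        omega
  obtain ⟨hp1, hp2, hp3⟩ := PySem.List.bisectLeft_spec (g.map (·.1)) qy hyle
  rw [hlen] at hp1
  have hlt' : ∀ k (hk : k < g.length), k < PySem.List.bisectLeft (g.map (·.1)) qy →
      g[k].1 < qy := by
    intro k hk hkj
    have := hp2 k (by rw [hlen]; exact hk) hkj
    simpa using this
  have hge' : ∀ k (hk : k < g.length), PySem.List.bisectLeft (g.map (·.1)) qy ≤ k →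
      qy ≤ g[k].1 := by
    intro k hk hkj
    have := hp3 k (by rw [hlen]; exact hk) hkj
    simpa using this
  simp only [pvBPick]
  split_ifs with hA hB hC
  -- ===== branch: pos = len (all y below qy) =====
  · have hpos1 : 1 ≤ PySem.List.bisectLeft (g.map (·.1)) qy := by omega
    have hple : PySem.List.bisectLeft (g.map (·.1)) qy - 1 < g.length := by omega
    have hly : (PySem.List.pyGet? (g.map (·.1))
        ((PySem.List.bisectLeft (g.map (·.1)) qy : Int) - 1)).getD 0
        = (g[PySem.List.bisectLeft (g.map (·.1)) qy - 1]'hple).1 := by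
      rw [show ((PySem.List.bisectLeft (g.map (·.1)) qy : Int) - 1)
          = ((PySem.List.bisectLeft (g.map (·.1)) qy - 1 : Nat) : Int) by omega,
        PySem.List.pyGet?_natCast,
        List.getElem?_eq_getElem (by rw [hlen]; exact hple)]
      simp
    rw [hly]
    obtain ⟨hj, hjle, hjy, hjmin⟩ := hrun _ hple
    have hlyqyA : (g[PySem.List.bisectLeft (g.map (·.1)) qy - 1]'hple).1 < qy :=
      hlt' _ hple (by omega)
    rw [show PySem.List.pyGet? g ((PySem.List.bisectLeft (g.map (·.1))
          (g[PySem.List.bisectLeft (g.map (·.1)) qy - 1]'hple).1 : Nat) : Int)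
        = some (g[PySem.List.bisectLeft (g.map (·.1))
            (g[PySem.List.bisectLeft (g.map (·.1)) qy - 1]'hple).1]'hj) by
      rw [PySem.List.pyGet?_natCast, List.getElem?_eq_getElem hj], Option.getD_some]
    constructor
    · exact List.getElem_mem hj
    · intro u hu
      obtain ⟨k, hk, huk⟩ := List.mem_iff_getElem.mp hu
      subst huk
      have hky : g[k].1 < qy := hlt' k hk (by omega)
      have hkler : g[k].1 ≤ (g[PySem.List.bisectLeft (g.map (·.1)) qy - 1]'hple).1 :=
        hmono k _ hk hple (by omega)
      have hdc : pvDk qy (g[PySem.List.bisectLeft (g.map (·.1))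
            (g[PySem.List.bisectLeft (g.map (·.1)) qy - 1]'hple).1]'hj)
          = qy - (g[PySem.List.bisectLeft (g.map (·.1)) qy - 1]'hple).1 := by
        unfold pvDk pvAbs
        rw [hjy, if_pos (by omega)]
        omega
      have hdu : pvDk qy g[k] = qy - g[k].1 := by
        unfold pvDk pvAbs
        rw [if_pos (by omega)]
        omega
      unfold pvKle
      rw [hdc, hdu]
      by_cases hke : g[k].1 = (g[PySem.List.bisectLeft (g.map (·.1)) qy - 1]'hple).1
      · exact Or.inr ⟨by omega, hjmin k hk hke⟩
      · exact Or.inl (by omega)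
  -- ===== branch: pos = 0 (all y at or above qy) =====
  · have h0' : PySem.List.pyGet? g 0 = some (g[0]'hn) := by
      have := PySem.List.pyGet?_natCast g 0
      rw [List.getElem?_eq_getElem hn] at this
      simpa using this
    rw [h0', Option.getD_some]
    constructor
    · exact List.getElem_mem hn
    · intro u hu
      obtain ⟨k, hk, huk⟩ := List.mem_iff_getElem.mp hu
      subst huk
      have hky : qy ≤ g[k].1 := hge' k hk (by omega)
      have h0y : qy ≤ (g[0]'hn).1 := hge' 0 hn (by omega)
      have h0le : (g[0]'hn).1 ≤ g[k].1 := hmono 0 k hn hk (Nat.zero_le _)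
      have hdc : pvDk qy (g[0]'hn) = (g[0]'hn).1 - qy := by
        unfold pvDk pvAbs
        rw [if_neg (by omega)]
      have hdu : pvDk qy g[k] = g[k].1 - qy := by
        unfold pvDk pvAbs
        rw [if_neg (by omega)]
      unfold pvKle
      rw [hdc, hdu]
      by_cases hke : g[k].1 = (g[0]'hn).1
      · rcases Nat.eq_zero_or_pos k with rfl | hkpos
        · exact Or.inr ⟨by omega, le_refl _⟩
        · have := hstrict 0 k hn hk hkpos
          unfold pvLt at this
          exact Or.inr ⟨by omega, by omega⟩
      · exact Or.inl (by omega)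
  -- ===== branch: 0 < pos < len =====
  · have hposn : PySem.List.bisectLeft (g.map (·.1)) qy < g.length := by omega
    have hpos1 : 1 ≤ PySem.List.bisectLeft (g.map (·.1)) qy := by omega
    have hple : PySem.List.bisectLeft (g.map (·.1)) qy - 1 < g.length := by omega
    have hly : (PySem.List.pyGet? (g.map (·.1))
        ((PySem.List.bisectLeft (g.map (·.1)) qy : Int) - 1)).getD 0
        = (g[PySem.List.bisectLeft (g.map (·.1)) qy - 1]'hple).1 := by
      rw [show ((PySem.List.bisectLeft (g.map (·.1)) qy : Int) - 1)
          = ((PySem.List.bisectLeft (g.map (·.1)) qy - 1 : Nat) : Int) by omega,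
        PySem.List.pyGet?_natCast,
        List.getElem?_eq_getElem (by rw [hlen]; exact hple)]
      simp
    obtain ⟨hj, hjle, hjy, hjmin⟩ := hrun _ hple
    simp only [hly,
      show PySem.List.pyGet? g ((PySem.List.bisectLeft (g.map (·.1))
          (g[PySem.List.bisectLeft (g.map (·.1)) qy - 1]'hple).1 : Nat) : Int)
        = some (g[PySem.List.bisectLeft (g.map (·.1))
            (g[PySem.List.bisectLeft (g.map (·.1)) qy - 1]'hple).1]'hj) from by
        rw [PySem.List.pyGet?_natCast, List.getElem?_eq_getElem hj],
      show PySem.List.pyGet? g ((PySem.List.bisectLeft (g.map (·.1)) qy : Nat) : Int)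
        = some (g[PySem.List.bisectLeft (g.map (·.1)) qy]'hposn) from by
        rw [PySem.List.pyGet?_natCast, List.getElem?_eq_getElem hposn],
      Option.getD_some] at hC ⊢
    have hlyqy : (g[PySem.List.bisectLeft (g.map (·.1)) qy - 1]'hple).1 < qy :=
      hlt' _ hple (by omega)
    have hryqy : qy ≤ (g[PySem.List.bisectLeft (g.map (·.1)) qy]'hposn).1 :=
      hge' _ hposn (by omega)
    have hdl : pvDk qy (g[PySem.List.bisectLeft (g.map (·.1))
          (g[PySem.List.bisectLeft (g.map (·.1)) qy - 1]'hple).1]'hj)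
        = qy - (g[PySem.List.bisectLeft (g.map (·.1)) qy - 1]'hple).1 := by
      unfold pvDk pvAbs
      rw [hjy, if_pos (by omega)]
      omega
    have hdr : pvDk qy (g[PySem.List.bisectLeft (g.map (·.1)) qy]'hposn)
        = (g[PySem.List.bisectLeft (g.map (·.1)) qy]'hposn).1 - qy := by
      unfold pvDk pvAbs
      rw [if_neg (by omega)]
    have hkle_l : ∀ k (hk : k < g.length), k < PySem.List.bisectLeft (g.map (·.1)) qy →
        pvKle qy (g[PySem.List.bisectLeft (g.map (·.1))
          (g[PySem.List.bisectLeft (g.map (·.1)) qy - 1]'hple).1]'hj) g[k] := by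
      intro k hk hkp
      have hky : g[k].1 < qy := hlt' k hk hkp
      have hkler : g[k].1 ≤ (g[PySem.List.bisectLeft (g.map (·.1)) qy - 1]'hple).1 :=
        hmono k _ hk hple (by omega)
      have hdu : pvDk qy g[k] = qy - g[k].1 := by
        unfold pvDk pvAbs
        rw [if_pos (by omega)]
        omega
      unfold pvKle
      rw [hdl, hdu]
      by_cases hke : g[k].1 = (g[PySem.List.bisectLeft (g.map (·.1)) qy - 1]'hple).1
      · exact Or.inr ⟨by omega, hjmin k hk hke⟩
      · exact Or.inl (by omega)
    have hkle_r : ∀ k (hk : k < g.length), PySem.List.bisectLeft (g.map (·.1)) qy ≤ k →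
        pvKle qy (g[PySem.List.bisectLeft (g.map (·.1)) qy]'hposn) g[k] := by
      intro k hk hkp
      have hky : qy ≤ g[k].1 := hge' k hk hkp
      have hkger : (g[PySem.List.bisectLeft (g.map (·.1)) qy]'hposn).1 ≤ g[k].1 :=
        hmono _ k hposn hk hkp
      have hdu : pvDk qy g[k] = g[k].1 - qy := by
        unfold pvDk pvAbs
        rw [if_neg (by omega)]
      unfold pvKle
      rw [hdr, hdu]
      by_cases hke : g[k].1 = (g[PySem.List.bisectLeft (g.map (·.1)) qy]'hposn).1
      · rcases Nat.eq_or_lt_of_le hkp with heq | hlt2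
        · exact Or.inr ⟨by omega, by subst heq; exact le_refl _⟩
        · have := hstrict _ k hposn hk hlt2
          unfold pvLt at this
          exact Or.inr ⟨by omega, by omega⟩
      · exact Or.inl (by omega)
    constructor
    · exact List.getElem_mem hj
    · intro u hu
      obtain ⟨k, hk, huk⟩ := List.mem_iff_getElem.mp hu
      subst huk
      by_cases hkp : k < PySem.List.bisectLeft (g.map (·.1)) qy
      · exact hkle_l k hk hkp
      · refine pvKle_trans ?_ (hkle_r k hk (by omega))
        unfold pvKle
        rw [hdl, hdr]
        rw [hjy] at hC
        rcases hC with h | ⟨h1, h2⟩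
        · exact Or.inl (by omega)
        · exact Or.inr ⟨by omega, by omega⟩
  -- ===== branch: 0 < pos < len =====
  · have hposn : PySem.List.bisectLeft (g.map (·.1)) qy < g.length := by omega
    have hpos1 : 1 ≤ PySem.List.bisectLeft (g.map (·.1)) qy := by omega
    have hple : PySem.List.bisectLeft (g.map (·.1)) qy - 1 < g.length := by omega
    have hly : (PySem.List.pyGet? (g.map (·.1))
        ((PySem.List.bisectLeft (g.map (·.1)) qy : Int) - 1)).getD 0
        = (g[PySem.List.bisectLeft (g.map (·.1)) qy - 1]'hple).1 := by
      rw [show ((PySem.List.bisectLeft (g.map (·.1)) qy : Int) - 1)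
          = ((PySem.List.bisectLeft (g.map (·.1)) qy - 1 : Nat) : Int) by omega,
        PySem.List.pyGet?_natCast,
        List.getElem?_eq_getElem (by rw [hlen]; exact hple)]
      simp
    obtain ⟨hj, hjle, hjy, hjmin⟩ := hrun _ hple
    simp only [hly,
      show PySem.List.pyGet? g ((PySem.List.bisectLeft (g.map (·.1))
          (g[PySem.List.bisectLeft (g.map (·.1)) qy - 1]'hple).1 : Nat) : Int)
        = some (g[PySem.List.bisectLeft (g.map (·.1))
            (g[PySem.List.bisectLeft (g.map (·.1)) qy - 1]'hple).1]'hj) from by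
        rw [PySem.List.pyGet?_natCast, List.getElem?_eq_getElem hj],
      show PySem.List.pyGet? g ((PySem.List.bisectLeft (g.map (·.1)) qy : Nat) : Int)
        = some (g[PySem.List.bisectLeft (g.map (·.1)) qy]'hposn) from by
        rw [PySem.List.pyGet?_natCast, List.getElem?_eq_getElem hposn],
      Option.getD_some] at hC ⊢
    have hlyqy : (g[PySem.List.bisectLeft (g.map (·.1)) qy - 1]'hple).1 < qy :=
      hlt' _ hple (by omega)
    have hryqy : qy ≤ (g[PySem.List.bisectLeft (g.map (·.1)) qy]'hposn).1 :=
      hge' _ hposn (by omega)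
    have hdl : pvDk qy (g[PySem.List.bisectLeft (g.map (·.1))
          (g[PySem.List.bisectLeft (g.map (·.1)) qy - 1]'hple).1]'hj)
        = qy - (g[PySem.List.bisectLeft (g.map (·.1)) qy - 1]'hple).1 := by
      unfold pvDk pvAbs
      rw [hjy, if_pos (by omega)]
      omega
    have hdr : pvDk qy (g[PySem.List.bisectLeft (g.map (·.1)) qy]'hposn)
        = (g[PySem.List.bisectLeft (g.map (·.1)) qy]'hposn).1 - qy := by
      unfold pvDk pvAbs
      rw [if_neg (by omega)]
    have hkle_l : ∀ k (hk : k < g.length), k < PySem.List.bisectLeft (g.map (·.1)) qy →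
        pvKle qy (g[PySem.List.bisectLeft (g.map (·.1))
          (g[PySem.List.bisectLeft (g.map (·.1)) qy - 1]'hple).1]'hj) g[k] := by
      intro k hk hkp
      have hky : g[k].1 < qy := hlt' k hk hkp
      have hkler : g[k].1 ≤ (g[PySem.List.bisectLeft (g.map (·.1)) qy - 1]'hple).1 :=
        hmono k _ hk hple (by omega)
      have hdu : pvDk qy g[k] = qy - g[k].1 := by
        unfold pvDk pvAbs
        rw [if_pos (by omega)]
        omega
      unfold pvKle
      rw [hdl, hdu]
      by_cases hke : g[k].1 = (g[PySem.List.bisectLeft (g.map (·.1)) qy - 1]'hple).1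
      · exact Or.inr ⟨by omega, hjmin k hk hke⟩
      · exact Or.inl (by omega)
    have hkle_r : ∀ k (hk : k < g.length), PySem.List.bisectLeft (g.map (·.1)) qy ≤ k →
        pvKle qy (g[PySem.List.bisectLeft (g.map (·.1)) qy]'hposn) g[k] := by
      intro k hk hkp
      have hky : qy ≤ g[k].1 := hge' k hk hkp
      have hkger : (g[PySem.List.bisectLeft (g.map (·.1)) qy]'hposn).1 ≤ g[k].1 :=
        hmono _ k hposn hk hkp
      have hdu : pvDk qy g[k] = g[k].1 - qy := by
        unfold pvDk pvAbs
        rw [if_neg (by omega)]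
      unfold pvKle
      rw [hdr, hdu]
      by_cases hke : g[k].1 = (g[PySem.List.bisectLeft (g.map (·.1)) qy]'hposn).1
      · rcases Nat.eq_or_lt_of_le hkp with heq | hlt2
        · exact Or.inr ⟨by omega, by subst heq; exact le_refl _⟩
        · have := hstrict _ k hposn hk hlt2
          unfold pvLt at this
          exact Or.inr ⟨by omega, by omega⟩
      · exact Or.inl (by omega)
    constructor
    · exact List.getElem_mem hposn
    · intro u hu
      obtain ⟨k, hk, huk⟩ := List.mem_iff_getElem.mp hu
      subst huk
      by_cases hkp : k < PySem.List.bisectLeft (g.map (·.1)) qy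
      · refine pvKle_trans ?_ (hkle_l k hk hkp)
        unfold pvKle
        rw [hdl, hdr]
        push_neg at hC
        rw [hjy] at hC
        obtain ⟨h1, h2⟩ := hC
        by_cases hke : qy - (g[PySem.List.bisectLeft (g.map (·.1)) qy - 1]'hple).1
            = (g[PySem.List.bisectLeft (g.map (·.1)) qy]'hposn).1 - qy
        · exact Or.inr ⟨by omega, by have := h2 hke; omega⟩
        · exact Or.inl (by omega)
      · exact hkle_r k hk (by omega)

-- ========== uniqueness and transfer ==========

lemma pvBest_unique {qy : Int} {g : List (Int × Int × List Int)} {c1 c2 : Int × Int × List Int}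
    (hne : g.Pairwise (fun a b => a.2.1 ≠ b.2.1))
    (h1 : pvBest qy g c1) (h2 : pvBest qy g c2) : c1 = c2 := by
  by_contra hcc
  have hne12 : c1.2.1 ≠ c2.2.1 :=
    hne.forall (fun {x y} h => h.symm) h1.1 h2.1 hcc
  have k1 := h1.2 c2 h2.1
  have k2 := h2.2 c1 h1.1
  unfold pvKle at k1 k2
  omega

lemma pvBest_perm {qy : Int} {g1 g2 : List (Int × Int × List Int)} {c : Int × Int × List Int}
    (h : g1.Perm g2) (hb : pvBest qy g1 c) : pvBest qy g2 c := by
  exact ⟨h.mem_iff.mp hb.1, fun u hu => hb.2 u (h.mem_iff.mpr hu)⟩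

lemma pvPer_strip (qy : Int) {sd : List (Int × List Int)} {s : Int} (h : s ∈ pvSids sd) :
    pvBPick qy (PySem.List.sorted2 (pvTriples sd s) (·.1) (·.2.1))
        ((PySem.List.sorted2 (pvTriples sd s) (·.1) (·.2.1)).map (·.1))
      = pvChoice qy sd s := by
  have hperm := PySem.List.sorted2_perm (pvTriples sd s) (·.1) (·.2.1) false
  have hgs_ne : PySem.List.sorted2 (pvTriples sd s) (·.1) (·.2.1) ≠ [] := by
    intro h0
    exact pvTriples_ne_nil h (List.nil_perm.mp (h0 ▸ hperm))
  have hb2 := pvPick_best qy _ hgs_ne (pvGs_pairwise_lt (sd := sd) (s := s))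
  have hb1 := pvChoice_best (qy := qy) h
  have hnei : (pvTriples sd s).Pairwise (fun a b => a.2.1 ≠ b.2.1) :=
    (pvTriples_pairwise sd s).imp (fun h => ne_of_lt h)
  exact pvBest_unique hnei (pvBest_perm hperm hb2) hb1

-- ===== VERDICT (by name: the statement is the Claim_ definition above) =====
theorem find_closest_point_by_y_spec : Claim_equal_find_closest_point_by_y := by
  intro query_points strip_data _ _
  unfold Spec_find_closest_point_by_y
  rw [pvA_eq, pvB_eq]
  apply List.map_congr_left
  intro q _
  apply List.map_congr_left
  intro s hs
  rw [pvPer_strip _ hs]
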